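-- pv_equiv track=rewrite | github.com/jonesjacklewis/pythonAnagramFinder | main.py | get_longest_anagram
-- ===== SOURCE A (Python) =====
-- from typing import List, Dict
--
-- def get_longest_anagram(anagrams: Dict[str, List[str]]) -> Dict[str, List[str]]:
--     """Find the words with the longest anagrams
--
--     Args:
--         anagrams (Dict[str, List[str]]): List of all anagrams
--
--     Returns:
--         Dict[str, List[str]]: Longest anagrams
--     """
--
--     longest_word_length: int = max(
--         len(word)
--         for word in anagrams.keys()
--         if len(anagrams[word]) > 1
--     )
--
--     filtered_anagrams: Dict[str, List[str]] = {
--         standard_form: anagram_list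
--         for standard_form, anagram_list in anagrams.items()
--         if len(standard_form) == longest_word_length and len(anagram_list) > 1
--     }
--
--     return filtered_anagrams
-- ===== SOURCE B (Python) =====
-- from typing import List, Dict
--
-- def get_longest_anagram(anagrams: Dict[str, List[str]]) -> Dict[str, List[str]]:
--     """Single pass: track the best key length and the current result dict."""
--     best_len = -1
--     result: Dict[str, List[str]] = {}
--     for key, words in anagrams.items():
--         if len(words) <= 1:
--             continue
--         if len(key) > best_len:
--             best_len = len(key)
--             result = {key: words}
--         elif len(key) == best_len:
--             result[key] = words
--     return result
-- ===== Notes on version B (the rewrite author's own statement) =====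
-- stated objective: alternative
-- what changed: A makes two passes (a max() over qualifying key lengths, then a dict comprehension filtering by that length); B makes one pass over items(), maintaining the best length so far and a result dict that it resets on a longer key and extends on a tie.
import Mathlib
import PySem

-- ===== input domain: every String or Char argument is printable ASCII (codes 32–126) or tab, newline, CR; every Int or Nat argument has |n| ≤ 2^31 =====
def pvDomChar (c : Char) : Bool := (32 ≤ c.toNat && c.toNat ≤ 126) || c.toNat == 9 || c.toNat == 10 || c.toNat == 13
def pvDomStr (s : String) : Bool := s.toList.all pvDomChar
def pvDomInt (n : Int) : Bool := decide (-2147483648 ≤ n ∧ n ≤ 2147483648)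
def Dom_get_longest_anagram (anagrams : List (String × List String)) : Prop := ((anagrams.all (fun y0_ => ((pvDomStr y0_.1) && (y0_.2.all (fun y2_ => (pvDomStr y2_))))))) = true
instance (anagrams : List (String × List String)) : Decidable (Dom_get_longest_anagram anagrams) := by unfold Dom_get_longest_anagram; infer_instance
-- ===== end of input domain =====

-- B replaces A's two passes (max of qualifying key lengths, then a filtering comprehension)
-- by one pass over the items that maintains the best length and the current result.


-- ===== PORT A =====
-- The Python argument is a dict; under Pre_ (distinct keys) `PySem.Dict.mk anagrams` is that dict.
def get_longest_anagram (anagrams : List (String × List String)) : List (String × List String) :=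
  let d := PySem.Dict.mk anagrams
  -- max(len(word) for word in anagrams.keys() if len(anagrams[word]) > 1)
  let lens : List Int := d.keys.filterMap
    (fun w => if 1 < (d.getD w []).length then some (PySem.Str.len w) else none)
  match PySem.List.max? lens (fun x => x) with
  | none => []   -- Python raises ValueError here; excluded by Pre_
  | some longest =>
      -- {k: v for k, v in anagrams.items() if len(k) == longest and len(v) > 1}
      d.items.filter (fun p => PySem.Str.len p.1 == longest && decide (1 < p.2.length))

-- ===== PORT B =====
-- single pass over items(): skip short lists; reset the result on a longer key, extend it on a tie
def get_longest_anagram_alt (anagrams : List (String × List String)) : List (String × List String) :=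
  (anagrams.foldl
    (fun (st : Int × List (String × List String)) p =>
      if p.2.length ≤ 1 then st
      else if st.1 < PySem.Str.len p.1 then (PySem.Str.len p.1, [p])
      else if PySem.Str.len p.1 == st.1 then (st.1, st.2 ++ [p])
      else st)
    (-1, [])).2

-- ===== PRECONDITION & SPEC =====
-- Pre_ excludes (i) inputs where A's max() raises ValueError (no entry with more than one
-- anagram) and (ii) duplicate keys, which a Python dict argument cannot represent.
def Pre_get_longest_anagram (anagrams : List (String × List String)) : Prop :=
  (anagrams.map Prod.fst).Nodup ∧ ∃ p ∈ anagrams, 1 < p.2.length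
instance (anagrams : List (String × List String)) : Decidable (Pre_get_longest_anagram anagrams) := by unfold Pre_get_longest_anagram; infer_instance
def pvWitness_get_longest_anagram : (List (String × List String)) := [("abc", ["abc", "cab"])]

def Spec_get_longest_anagram (anagrams : List (String × List String)) (out : List (String × List String)) : Prop := out = get_longest_anagram_alt anagrams
instance (anagrams : List (String × List String)) (out : List (String × List String)) : Decidable (Spec_get_longest_anagram anagrams out) := by unfold Spec_get_longest_anagram; infer_instance

-- ===== CLAIM (what is proved, stated in full; the proofs are below) =====
def Claim_equal_get_longest_anagram : Prop := ∀ (anagrams : List (String × List String)), Dom_get_longest_anagram anagrams → Pre_get_longest_anagram anagrams → Spec_get_longest_anagram anagrams (get_longest_anagram anagrams)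

-- ===== LEMMAS AND PROOFS =====

-- the qualifying key lengths, read off the association list
def pvLens (l : List (String × List String)) : List Int :=
  l.filterMap (fun p => if 1 < p.2.length then some ((p.1.length : Int)) else none)

-- one cons step of the result filter when the entry qualifies / does not qualify
theorem pv_filter_cons_qual (p : String × List String) (t : List (String × List String)) (M : Int)
    (h : 1 < p.2.length) :
    List.filter (fun x => (x.1.length : Int) == M && decide (1 < x.2.length)) (p :: t)
    = (if (p.1.length : Int) = M then [p] else []) ++
      List.filter (fun x => (x.1.length : Int) == M && decide (1 < x.2.length)) t := by
  rw [List.filter_cons]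
  by_cases hpm : (p.1.length : Int) = M
  · simp [hpm, h]
  · simp [hpm, h]

theorem pv_filter_cons_short (p : String × List String) (t : List (String × List String)) (M : Int)
    (h : ¬ 1 < p.2.length) :
    List.filter (fun x => (x.1.length : Int) == M && decide (1 < x.2.length)) (p :: t)
    = List.filter (fun x => (x.1.length : Int) == M && decide (1 < x.2.length)) t := by
  rw [List.filter_cons]
  simp [h]

theorem pv_fold_inv (l : List (String × List String)) (m : Int) (r : List (String × List String)) :
    l.foldl
      (fun (st : Int × List (String × List String)) p =>
        if p.2.length ≤ 1 then st
        else if st.1 < (p.1.length : Int) then ((p.1.length : Int), [p])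
        else if (p.1.length : Int) == st.1 then (st.1, st.2 ++ [p])
        else st)
      (m, r)
    = ((pvLens l).foldl max m,
       (if (pvLens l).foldl max m = m then r else []) ++
         l.filter (fun p => (p.1.length : Int) == (pvLens l).foldl max m && decide (1 < p.2.length))) := by
  induction l generalizing m r with
  | nil => simp [pvLens]
  | cons p t ih =>
    by_cases hq : p.2.length ≤ 1
    · have hq' : ¬ (1 < p.2.length) := by omega
      have hlens : pvLens (p :: t) = pvLens t := by simp [pvLens, hq']
      rw [List.foldl_cons]
      simp only [if_pos hq, ih, hlens, pv_filter_cons_short p t _ hq']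
    · have hq' : (1 < p.2.length) := by omega
      have hlens : pvLens (p :: t) = (p.1.length : Int) :: pvLens t := by
        simp [pvLens, hq']
      rw [List.foldl_cons, hlens, List.foldl_cons]
      by_cases h1 : m < (p.1.length : Int)
      · have hmax : max m (p.1.length : Int) = (p.1.length : Int) := by omega
        have hM := PySem.List.le_foldl_max (pvLens t) (p.1.length : Int)
        simp only [if_neg hq, if_pos h1, ih]
        rw [hmax, if_neg (by omega : ¬ ((pvLens t).foldl max (p.1.length : Int) = m)),
          pv_filter_cons_qual p t _ hq']
        by_cases he : ((pvLens t).foldl max (p.1.length : Int) = (p.1.length : Int))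
        · rw [if_pos he, if_pos he.symm]
          simp
        · rw [if_neg he, if_neg (by omega : ¬ ((p.1.length : Int) = (pvLens t).foldl max (p.1.length : Int)))]
          simp
      · have hmax : max m (p.1.length : Int) = m := by omega
        have hM := PySem.List.le_foldl_max (pvLens t) m
        rw [hmax]
        by_cases h2 : ((p.1.length : Int) = m)
        · have hbeq : (((p.1.length : Int)) == m) = true := by simp [h2]
          simp only [if_neg hq, if_neg h1, hbeq, if_true, ih, pv_filter_cons_qual p t _ hq']
          by_cases he : ((pvLens t).foldl max m = m)
          · rw [if_pos he, if_pos he, if_pos (by omega : (p.1.length : Int) = (pvLens t).foldl max m)]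
            simp
          · rw [if_neg he, if_neg he, if_neg (by omega : ¬ ((p.1.length : Int) = (pvLens t).foldl max m))]
            simp
        · have hbeq : (((p.1.length : Int)) == m) = false := by simp [h2]
          simp only [if_neg hq, if_neg h1, hbeq, Bool.false_eq_true, if_false, ih,
            pv_filter_cons_qual p t _ hq']
          rw [if_neg (by omega : ¬ ((p.1.length : Int) = (pvLens t).foldl max m))]
          simp

theorem pvLens_nonneg (l : List (String × List String)) : ∀ x ∈ pvLens l, 0 ≤ x := by
  intro x hx
  simp only [pvLens, List.mem_filterMap] at hx
  obtain ⟨p, _, hp⟩ := hx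
  split at hp
  · cases hp; positivity
  · cases hp

theorem get_longest_anagram_spec : Claim_equal_get_longest_anagram := by
  intro l _ hpre
  obtain ⟨hnd, q, hq, hqlen⟩ := hpre
  unfold Spec_get_longest_anagram get_longest_anagram get_longest_anagram_alt
  simp only [PySem.Str.len_eq, String.length_toList]
  rw [pv_fold_inv]
  have hkeys : (PySem.Dict.mk l).keys = l.map Prod.fst := rfl
  have hnd' : (PySem.Dict.mk l).keys.Nodup := by rw [hkeys]; exact hnd
  have hlens : (PySem.Dict.mk l).keys.filterMap
      (fun w => if 1 < ((PySem.Dict.mk l).getD w []).length then some ((w.length : Int)) else none)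
      = pvLens l := by
    rw [hkeys, List.filterMap_map, pvLens]
    apply List.filterMap_congr
    intro p hp
    have := PySem.Dict.getD_of_mem_items (d := PySem.Dict.mk l) (k := p.1) (v := p.2)
      (by exact hp) hnd' (d0 := [])
    simp [Function.comp, this]
  rw [hlens]
  have hmem : ((q.1.length : Int)) ∈ pvLens l := by
    simp only [pvLens, List.mem_filterMap]
    exact ⟨q, hq, by rw [if_pos hqlen]⟩
  obtain ⟨x, t, hxt⟩ : ∃ x t, pvLens l = x :: t := by
    cases h : pvLens l with
    | nil => rw [h] at hmem; cases hmem
    | cons x t => exact ⟨x, t, rfl⟩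
  have hx0 : 0 ≤ x := pvLens_nonneg l x (by rw [hxt]; exact List.mem_cons_self ..)
  rw [hxt, PySem.List.max?_id_cons]
  have hfold : (x :: t).foldl max (-1) = t.foldl max x := by
    rw [List.foldl_cons]
    congr 1
    omega
  have hM := PySem.List.le_foldl_max t x
  rw [hfold, if_neg (by omega : ¬ (t.foldl max x = (-1 : Int)))]
  simp
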